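-- pv_equiv track=rewrite | github.com/McDuuck/Mooc-python | osa05/sudoku_tarkistin.py | nelio_oikein
-- ===== SOURCE A (Python) =====
-- def nelio_oikein(sudoku: list, rivi: int, sarake: int):
--     n2 = 0
--     n3 = sarake
--     lista = []
--     while n2 < 3:
--         n1 = sudoku[rivi][n3]
--         if n1 != 0:
--             lista.append(n1)
--         n3 += 1
--         n2 += 1
--     n3 = sarake
--     n2 = 0
--     while n2 < 3:
--         n1 = sudoku[rivi+1][n3]
--         if n1 != 0:
--             lista.append(n1)
--         n3 += 1
--         n2 += 1
--     n3 = sarake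
--     n2 = 0
--     while n2 < 3:
--         n1 = sudoku[rivi+2][n3]
--         if n1 != 0:
--             lista.append(n1)
--         n3 += 1
--         n2 += 1
--
--     if len(lista) == len(set(lista)):
--         return True
--     else:
--         return False
-- ===== SOURCE B (Python) =====
-- def nelio_oikein(sudoku: list, rivi: int, sarake: int):
--     vals = sorted(sudoku[rivi + i][sarake + j]
--                   for i in range(3) for j in range(3)
--                   if sudoku[rivi + i][sarake + j] != 0)
--     return all(a < b for a, b in zip(vals, vals[1:]))
-- ===== Notes on version B (the rewrite author's own statement) =====
-- stated objective: alternative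
-- what changed: Replaces the three copy-pasted collect-into-list loops plus len(list)==len(set) cardinality comparison with sort-then-scan duplicate detection: collect the nonzero block values in one comprehension, sort them, and check the sorted sequence is strictly increasing over adjacent pairs.
import Mathlib
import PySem

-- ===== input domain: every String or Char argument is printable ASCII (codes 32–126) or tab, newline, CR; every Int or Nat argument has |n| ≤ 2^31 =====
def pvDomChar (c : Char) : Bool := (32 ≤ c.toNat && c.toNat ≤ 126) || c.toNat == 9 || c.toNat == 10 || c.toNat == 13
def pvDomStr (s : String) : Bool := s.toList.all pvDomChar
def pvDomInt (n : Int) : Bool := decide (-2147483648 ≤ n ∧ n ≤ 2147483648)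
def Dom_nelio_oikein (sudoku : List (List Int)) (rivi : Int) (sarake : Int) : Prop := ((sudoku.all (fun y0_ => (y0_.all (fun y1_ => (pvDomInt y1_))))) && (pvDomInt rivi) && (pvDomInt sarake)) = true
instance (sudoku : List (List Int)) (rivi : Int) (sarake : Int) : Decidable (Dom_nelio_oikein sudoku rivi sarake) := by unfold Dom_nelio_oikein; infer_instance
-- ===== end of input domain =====

-- B replaces A's three collect loops + len(list)==len(set) test with sort-then-scan
-- duplicate detection: sort the nonzero block values, check strict increase of adjacent pairs.


-- shared indexing helper: sudoku[r][c] with Python index semantics, total form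
-- (defaults only reachable outside Pre_, where nothing is claimed)
def pvCell (sudoku : List (List Int)) (r c : Int) : Int :=
  PySem.List.pyGetD (PySem.List.pyGetD sudoku r []) c 0

-- ===== PORT A =====
-- one 'while n2 < 3' pass of A: appends the nonzero values of row r, cols sarake..sarake+2
def aPass (sudoku : List (List Int)) (r sarake : Int) (lista : List Int) : List Int :=
  (PySem.List.pyRange 0 3 1).foldl
    (fun acc n2 => let n1 := pvCell sudoku r (sarake + n2); if n1 ≠ 0 then acc ++ [n1] else acc)
    lista

def nelio_oikein (sudoku : List (List Int)) (rivi : Int) (sarake : Int) : Bool :=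
  let l1 := aPass sudoku rivi sarake []
  let l2 := aPass sudoku (rivi + 1) sarake l1
  let lista := aPass sudoku (rivi + 2) sarake l2
  if lista.length = (PySem.Set.ofList lista).length then true else false

-- ===== PORT B =====
-- the comprehension: nonzero values of the nine cells, row-major
def bVals (sudoku : List (List Int)) (rivi sarake : Int) : List Int :=
  (PySem.List.pyRange 0 3 1).flatMap (fun i =>
    (PySem.List.pyRange 0 3 1).flatMap (fun j =>
      if pvCell sudoku (rivi + i) (sarake + j) ≠ 0
      then [pvCell sudoku (rivi + i) (sarake + j)] else []))

def nelio_oikein_alt (sudoku : List (List Int)) (rivi : Int) (sarake : Int) : Bool :=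
  let vals := PySem.List.sorted (bVals sudoku rivi sarake) (fun x => x) false
  (vals.zip (vals.drop 1)).all (fun p => decide (p.1 < p.2))

-- ===== PRECONDITION & SPEC =====
-- Pre_ excludes exactly the inputs on which A raises IndexError: some of the nine
-- accesses sudoku[rivi+i][sarake+j] (Python index semantics) is out of range.
def Pre_nelio_oikein (sudoku : List (List Int)) (rivi : Int) (sarake : Int) : Prop :=
  ∀ i ∈ ([0, 1, 2] : List Int),
    PySem.Raise.InRange sudoku.length (rivi + i) ∧
    ∀ j ∈ ([0, 1, 2] : List Int),
      PySem.Raise.InRange (PySem.List.pyGetD sudoku (rivi + i) []).length (sarake + j)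
instance (sudoku : List (List Int)) (rivi : Int) (sarake : Int) : Decidable (Pre_nelio_oikein sudoku rivi sarake) := by unfold Pre_nelio_oikein; infer_instance

def pvWitness_nelio_oikein : List (List Int) × Int × Int :=
  ([[1, 2, 3], [4, 5, 6], [7, 8, 0]], 0, 0)

def Spec_nelio_oikein (sudoku : List (List Int)) (rivi : Int) (sarake : Int) (out : Bool) : Prop := out = nelio_oikein_alt sudoku rivi sarake
instance (sudoku : List (List Int)) (rivi : Int) (sarake : Int) (out : Bool) : Decidable (Spec_nelio_oikein sudoku rivi sarake out) := by unfold Spec_nelio_oikein; infer_instance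

-- ===== CLAIM (what is proved, stated in full; the proofs are below) =====
def Claim_equal_nelio_oikein : Prop := ∀ (sudoku : List (List Int)) (rivi : Int) (sarake : Int), Dom_nelio_oikein sudoku rivi sarake → Pre_nelio_oikein sudoku rivi sarake → Spec_nelio_oikein sudoku rivi sarake (nelio_oikein sudoku rivi sarake)

-- ===== LEMMAS AND PROOFS =====

theorem pvRange013 : PySem.List.pyRange 0 3 1 = [0, 1, 2] := by decide

theorem nodup_app_single (L : List Int) (x : Int) : (L ++ [x]).Nodup ↔ L.Nodup ∧ x ∉ L := by
  constructor
  · intro h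
    rw [List.nodup_append] at h
    exact ⟨h.1, fun hm => by simpa using h.2.2 x hm⟩
  · intro ⟨h1, h2⟩
    rw [List.nodup_append]
    exact ⟨h1, by simp, by intro a ha b hb; simp at hb; subst hb; exact fun he => h2 (he ▸ ha)⟩

-- A's Python len(lista) == len(set(lista)) test decides Nodup
theorem ofList_length_iff_nodup (L : List Int) :
    (L.length = (PySem.Set.ofList L).length) ↔ L.Nodup := by
  induction L using List.reverseRecOn with
  | nil => simp
  | append_singleton L x ih =>
      have hfold : PySem.Set.ofList (L ++ [x]) = PySem.Set.add (PySem.Set.ofList L) x := by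
        simp [PySem.Set.ofList_eq_foldl, List.foldl_append]
      have hle := PySem.Set.length_ofList_le (xs := L)
      rw [nodup_app_single]
      by_cases hx : x ∈ L
      · have hmem : x ∈ PySem.Set.ofList L := (PySem.Set.mem_ofList L x).2 hx
        have hadd : PySem.Set.add (PySem.Set.ofList L) x = PySem.Set.ofList L := by
          simp [PySem.Set.add, hmem]
        rw [hfold, hadd]
        simp only [List.length_append, List.length_singleton]
        constructor
        · intro h; omega
        · intro h; exact absurd hx h.2
      · have hmem : x ∉ PySem.Set.ofList L := fun h => hx ((PySem.Set.mem_ofList L x).1 h)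
        have hadd : PySem.Set.add (PySem.Set.ofList L) x = PySem.Set.ofList L ++ [x] := by
          simp [PySem.Set.add, hmem]
        rw [hfold, hadd]
        simp only [List.length_append, List.length_singleton]
        constructor
        · intro h; exact ⟨ih.1 (by omega), hx⟩
        · intro h; have := ih.2 h.1; omega

theorem aPass_eq (sudoku : List (List Int)) (r s : Int) (lista : List Int) :
    aPass sudoku r s lista =
      lista ++ ([pvCell sudoku r (s + 0), pvCell sudoku r (s + 1),
        pvCell sudoku r (s + 2)].filter (fun v => v ≠ 0)) := by
  simp only [aPass, pvRange013, List.foldl_cons, List.foldl_nil, List.filter_cons,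
    List.filter_nil]
  split_ifs <;> simp_all

-- B's adjacent-pair scan decides Chain' (<)
theorem allZip_eq_ischain (s : List Int) :
    ((s.zip (s.drop 1)).all (fun p => decide (p.1 < p.2))) = decide (List.IsChain (· < ·) s) := by
  induction s with
  | nil => decide
  | cons a t ih =>
      cases t with
      | nil => simp
      | cons b u =>
          have h := ih
          simp only [List.drop_one, List.tail_cons, List.zip_cons_cons, List.all_cons,
            List.isChain_cons_cons] at *
          rw [h]
          by_cases hab : a < b <;> simp [hab]

-- on a ≤-sorted list, strict adjacent increase ⟺ Nodup
theorem ischain_lt_iff_nodup (s : List Int) (hs : s.Pairwise (· ≤ ·)) :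
    List.IsChain (· < ·) s ↔ s.Nodup := by
  rw [List.isChain_iff_pairwise]
  constructor
  · intro h; exact h.imp (fun hab => ne_of_lt hab)
  · intro h
    exact (hs.and h).imp (fun hab => lt_of_le_of_ne hab.1 hab.2)

-- B computes decide L.Nodup for its collected list L
theorem alt_eq_nodup (sudoku : List (List Int)) (rivi sarake : Int) :
    nelio_oikein_alt sudoku rivi sarake = decide (bVals sudoku rivi sarake).Nodup := by
  unfold nelio_oikein_alt
  rw [allZip_eq_ischain]
  have hperm := PySem.List.sorted_perm (xs := bVals sudoku rivi sarake)
    (key := fun x : Int => x) (rev := false)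
  have hpw := PySem.List.sorted_pairwise (xs := bVals sudoku rivi sarake)
    (key := fun x : Int => x)
  simp only [ischain_lt_iff_nodup _ hpw, hperm.nodup_iff]

theorem filter3 (a b c : Int) :
    [a, b, c].filter (fun v => v ≠ 0) =
      (if a ≠ 0 then [a] else []) ++ (if b ≠ 0 then [b] else []) ++
        (if c ≠ 0 then [c] else []) := by
  split_ifs <;> simp_all

-- ===== VERDICT (by name: the statement is the Claim_ definition above) =====
theorem nelio_oikein_spec : Claim_equal_nelio_oikein := by
  intro sudoku rivi sarake _ _
  unfold Spec_nelio_oikein nelio_oikein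
  rw [alt_eq_nodup]
  have key : ∀ L : List Int,
      (if L.length = (PySem.Set.ofList L).length then true else false) = decide L.Nodup := by
    intro L
    by_cases h : L.length = (PySem.Set.ofList L).length
    · simp [h, (ofList_length_iff_nodup L).1 h]
    · have hn : ¬ L.Nodup := fun hn => h ((ofList_length_iff_nodup L).2 hn)
      simp [h, hn]
  rw [show (have l1 := aPass sudoku rivi sarake [];
      have l2 := aPass sudoku (rivi + 1) sarake l1;
      have lista := aPass sudoku (rivi + 2) sarake l2;
      if lista.length = List.length (PySem.Set.ofList lista) then true else false)
      = decide ((aPass sudoku (rivi + 2) sarake (aPass sudoku (rivi + 1) sarake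
          (aPass sudoku rivi sarake []))).Nodup) from key _]
  congr 1
  rw [aPass_eq, aPass_eq, aPass_eq, filter3, filter3, filter3]
  simp only [bVals, pvRange013, List.flatMap_cons, List.flatMap_nil, List.append_nil,
    List.nil_append, List.append_assoc, add_zero]
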